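-- pv_equiv track=rewrite | github.com/Ymm0709/NBA-Decision-Engine | scrape_nba.py | dedupe_players_current_stint
-- ===== SOURCE A (Python) =====
-- _AGG_TEAM_MARKERS = frozenset({"TOT", "2TM", "3TM", "4TM"})
--
-- def _is_named_team_stint(team_abbr: str) -> bool:
--     t = (team_abbr or "").strip().upper()
--     if not t:
--         return False
--     if t in _AGG_TEAM_MARKERS:
--         return False
--     return True
--
-- def dedupe_players_current_stint(players: list[dict]) -> list[dict]:
--     """同一 player_id 多行（交易）：只保留 BR 表 tbody 顺序中最后一支真实球队 stint。
--
--     联盟 Per Game 表通常为「汇总行 + 各队 stint 按时间顺序」，最后一行 stint 视为当季当下所在队。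
--     """
--     by_id: dict[str, list[dict]] = {}
--     for p in players:
--         pid = (p.get("player_id") or "").strip()
--         if not pid:
--             continue
--         by_id.setdefault(pid, []).append(p)
--
--     out: list[dict] = []
--     emitted: set[str] = set()
--     for p in players:
--         pid = (p.get("player_id") or "").strip()
--         if not pid:
--             out.append(p)
--             continue
--         if pid in emitted:
--             continue
--         emitted.add(pid)
--         group = by_id.get(pid, [p])
--         stints = [r for r in group if _is_named_team_stint(str(r.get("team_abbr", "")))]
--         if not stints:
--             out.append(group[0])
--         else:
--             out.append(stints[-1])
--     return out
-- ===== SOURCE B (Python) =====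
-- _AGG_TEAM_MARKERS = frozenset({"TOT", "2TM", "3TM", "4TM"})
--
-- def _is_named_team_stint(team_abbr: str) -> bool:
--     t = (team_abbr or "").strip().upper()
--     if not t:
--         return False
--     if t in _AGG_TEAM_MARKERS:
--         return False
--     return True
--
-- def dedupe_players_current_stint(players: list[dict]) -> list[dict]:
--     """One pass: keep a slot per player_id in the output; the last named-team
--     stint (or the first row, if none is named) wins that slot."""
--     out: list[dict] = []
--     slot: dict[str, int] = {}
--     for p in players:
--         pid = (p.get("player_id") or "").strip()
--         if not pid:
--             out.append(p)
--             continue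
--         if pid not in slot:
--             slot[pid] = len(out)
--             out.append(p)
--         if _is_named_team_stint(str(p.get("team_abbr", ""))):
--             out[slot[pid]] = p
--     return out
-- ===== Notes on version B (the rewrite author's own statement) =====
-- stated objective: simpler
-- what changed: Replaced A's two-phase design (group all rows into a by_id dict of lists, then re-scan with an emitted set, filtering each group for named stints) by a single pass that keeps one output slot per player_id and overwrites that slot whenever a named-team stint row arrives (last named stint wins, first row as fallback).
import Mathlib
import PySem

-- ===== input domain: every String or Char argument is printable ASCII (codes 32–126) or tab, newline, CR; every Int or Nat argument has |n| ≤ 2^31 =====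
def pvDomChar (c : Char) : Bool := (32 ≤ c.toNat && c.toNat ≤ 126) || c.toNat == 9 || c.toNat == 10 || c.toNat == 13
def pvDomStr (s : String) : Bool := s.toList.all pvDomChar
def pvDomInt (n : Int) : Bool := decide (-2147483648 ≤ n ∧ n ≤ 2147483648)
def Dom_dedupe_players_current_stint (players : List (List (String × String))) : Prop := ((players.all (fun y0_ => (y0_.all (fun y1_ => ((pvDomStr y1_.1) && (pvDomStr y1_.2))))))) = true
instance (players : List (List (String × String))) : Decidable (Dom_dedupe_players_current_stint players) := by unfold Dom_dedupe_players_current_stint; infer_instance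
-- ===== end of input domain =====

-- B replaces A's group-then-rescan design by a single pass keeping one output slot per
-- player_id, overwritten by each named-team stint row (objective: simpler; same return value).

-- ===== PORT A =====
-- module constant _AGG_TEAM_MARKERS (frozenset; membership test only)
def pvAggTeamMarkers : List String := ["TOT", "2TM", "3TM", "4TM"]

-- helper _is_named_team_stint, shared by both versions; `(team_abbr or "")` equals
-- `team_abbr` under `.strip()` since the argument is always a str here
def pv_is_named_team_stint (team_abbr : String) : Bool :=
  let t := PySem.Str.upper (PySem.Str.strip team_abbr)
  if t = "" then false
  else if pvAggTeamMarkers.contains t then false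
  else true

-- `(p.get("player_id") or "").strip()`: both a missing key and "" collapse to "", i.e. getD
def pvPid (p : List (String × String)) : String :=
  PySem.Str.strip (PySem.Dict.getD { items := p } "player_id" "")

-- `_is_named_team_stint(str(r.get("team_abbr", "")))` (str of a str is itself)
def pvNamed (r : List (String × String)) : Bool :=
  pv_is_named_team_stint (PySem.Dict.getD { items := r } "team_abbr" "")

-- body of A's first loop: `by_id.setdefault(pid, []).append(p)` behind the "" guard
def pvStepBuild (d : PySem.Dict String (List (List (String × String))))
    (p : List (String × String)) : PySem.Dict String (List (List (String × String))) :=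
  let pid := pvPid p
  if pid = "" then d
  else PySem.Dict.insert d pid (PySem.Dict.getD d pid [] ++ [p])

def pvById (players : List (List (String × String))) :
    PySem.Dict String (List (List (String × String))) :=
  players.foldl pvStepBuild PySem.Dict.empty

-- body of A's second loop over the state (out, emitted)
def pvStepA (by_id : PySem.Dict String (List (List (String × String))))
    (s : List (List (String × String)) × PySem.Set String)
    (p : List (String × String)) : List (List (String × String)) × PySem.Set String :=
  let out := s.1
  let emitted := s.2
  let pid := pvPid p
  if pid = "" then (out ++ [p], emitted)
  else if PySem.Set.contains emitted pid then (out, emitted)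
  else
    let emitted2 := PySem.Set.add emitted pid
    let group := PySem.Dict.getD by_id pid [p]
    let stints := group.filter pvNamed
    if stints = [] then (out ++ [group.headI], emitted2)  -- group[0]; group is nonempty on every reachable state
    else (out ++ [stints.getLastD []], emitted2)          -- stints[-1]; stints ≠ [] in this branch

def dedupe_players_current_stint (players : List (List (String × String))) :
    List (List (String × String)) :=
  (players.foldl (pvStepA (pvById players)) ([], PySem.Set.empty)).1

-- ===== PORT B =====
-- body of B's single loop over the state (out, slot)
def pvStepB (s : List (List (String × String)) × PySem.Dict String Nat)
    (p : List (String × String)) : List (List (String × String)) × PySem.Dict String Nat :=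
  let out := s.1
  let slot := s.2
  let pid := pvPid p
  if pid = "" then (out ++ [p], slot)
  else
    let os :=
      if PySem.Dict.contains slot pid then (out, slot)
      else (out ++ [p], PySem.Dict.insert slot pid out.length)
    if pvNamed p then
      (os.1.set (PySem.Dict.getD os.2 pid 0) p, os.2)  -- out[slot[pid]] = p; slot[pid] is present and in range on every reachable state
    else os

def dedupe_players_current_stint_alt (players : List (List (String × String))) :
    List (List (String × String)) :=
  (players.foldl pvStepB ([], PySem.Dict.empty)).1

-- ===== PRECONDITION & SPEC =====
def Spec_dedupe_players_current_stint (players : List (List (String × String))) (out : List (List (String × String))) : Prop := out = dedupe_players_current_stint_alt players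
instance (players : List (List (String × String))) (out : List (List (String × String))) : Decidable (Spec_dedupe_players_current_stint players out) := by unfold Spec_dedupe_players_current_stint; infer_instance

-- ===== CLAIM (what is proved, stated in full; the proofs are below) =====
def Claim_equal_dedupe_players_current_stint : Prop := ∀ (players : List (List (String × String))), Dom_dedupe_players_current_stint players → Spec_dedupe_players_current_stint players (dedupe_players_current_stint players)

-- ===== LEMMAS AND PROOFS =====

-- Common shape of both results: `pvUpd rest r` is the row that finally occupies a slot whose
-- current row is r, after the remaining rows `rest` have been processed.
def pvUpd (rest : List (List (String × String))) (r : List (String × String)) :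
    List (String × String) :=
  if pvPid r = "" then r
  else (rest.filter (fun x => pvNamed x && (pvPid x == pvPid r))).getLastD r

def pvEmit (s : String → Bool) :
    List (List (String × String)) → List (List (String × String))
  | [] => []
  | p :: rest =>
    if pvPid p = "" then p :: pvEmit s rest
    else if s (pvPid p) then pvEmit s rest
    else pvUpd (p :: rest) p :: pvEmit (fun k => k == pvPid p || s k) rest

lemma pvDict_contains_eq {ν : Type} (d : PySem.Dict String ν) (k : String) :
    PySem.Dict.contains d k = (PySem.Dict.get? d k).isSome := by
  simp only [PySem.Dict.contains, PySem.Dict.get?, Option.isSome_map]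
  induction d.items with
  | nil => rfl
  | cons p t ih => cases h : p.1 == k <;> simp [List.find?, h, ih]

lemma pvSet_contains_add (s : PySem.Set String) (x y : String) :
    PySem.Set.contains (PySem.Set.add s x) y = (y == x || PySem.Set.contains s y) := by
  rw [Bool.eq_iff_iff]
  simp only [PySem.Set.contains, List.contains_iff_mem, Bool.or_eq_true, beq_iff_eq]
  rw [PySem.Set.mem_add]
  tauto

lemma pvSetLast (l : List (List (String × String))) (a : List (String × String)) :
    (l ++ [a]).set l.length a = l ++ [a] := by
  induction l with
  | nil => rfl
  | cons b t ih => simp [ih]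

lemma pvUpd_cons_of_ne (p : List (String × String)) (t : List (List (String × String)))
    (r : List (String × String))
    (h : pvNamed p = false ∨ pvPid p ≠ pvPid r ∨ pvPid r = "") :
    pvUpd (p :: t) r = pvUpd t r := by
  unfold pvUpd
  by_cases hr : pvPid r = ""
  · simp [hr]
  · have hb : (pvNamed p && (pvPid p == pvPid r)) = false := by
      rcases h with h | h | h
      · simp [h]
      · simp [h]
      · exact absurd h hr
    simp [hr, hb]

lemma pvUpd_cons_named (p : List (String × String)) (t : List (List (String × String)))
    (r : List (String × String)) (hpr : pvPid r = pvPid p) (hp : pvPid p ≠ "")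
    (hn : pvNamed p = true) : pvUpd (p :: t) r = pvUpd t p := by
  unfold pvUpd
  have hr : pvPid r ≠ "" := by rw [hpr]; exact hp
  rw [if_neg hr, if_neg hp, hpr, List.filter_cons]
  have hcond : (pvNamed p && (pvPid p == pvPid p)) = true := by simp [hn]
  rw [hcond]
  simp only [if_true]
  rw [List.getLastD_cons]

lemma pvUpd_cons_self (p : List (String × String)) (t : List (List (String × String)))
    (hp : pvPid p ≠ "") : pvUpd (p :: t) p = pvUpd t p := by
  cases hn : pvNamed p
  · exact pvUpd_cons_of_ne p t p (Or.inl hn)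
  · exact pvUpd_cons_named p t p rfl hp hn

lemma pvBuild_getD (rest : List (List (String × String)))
    (d : PySem.Dict String (List (List (String × String)))) (k : String) (hk : k ≠ "") :
    PySem.Dict.getD (rest.foldl pvStepBuild d) k []
      = PySem.Dict.getD d k [] ++ rest.filter (fun r => pvPid r == k) := by
  induction rest generalizing d with
  | nil => simp
  | cons p t ih =>
    rw [List.foldl_cons, ih, List.filter_cons]
    by_cases hp : pvPid p = ""
    · have h1 : pvStepBuild d p = d := by
        simp only [pvStepBuild]; rw [if_pos hp]
      have h2 : (pvPid p == k) = false := by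
        rw [hp]; exact beq_eq_false_iff_ne.mpr (Ne.symm hk)
      simp [h1, h2]
    · by_cases hpk : pvPid p = k
      · have h1 : pvStepBuild d p = PySem.Dict.insert d k (PySem.Dict.getD d k [] ++ [p]) := by
          simp only [pvStepBuild]; rw [if_neg hp, hpk]
        have h2 : (pvPid p == k) = true := by simp [hpk]
        simp [h1, h2, PySem.Dict.getD, PySem.Dict.get?_insert_self]
      · have h1 : pvStepBuild d p
            = PySem.Dict.insert d (pvPid p) (PySem.Dict.getD d (pvPid p) [] ++ [p]) := by
          simp only [pvStepBuild]; rw [if_neg hp]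
        have h2 : (pvPid p == k) = false := by simp [hpk]
        rw [h1]
        simp only [PySem.Dict.getD,
          PySem.Dict.get?_insert_of_ne d _ (fun h => hpk h.symm), h2]
        simp

lemma pvA_loop (all : List (List (String × String)))
    (by_id : PySem.Dict String (List (List (String × String))))
    (hby : ∀ k, k ≠ "" →
      PySem.Dict.getD by_id k [] = all.filter (fun r => pvPid r == k)) :
    ∀ (rest : List (List (String × String))) (emitted : PySem.Set String)
      (out : List (List (String × String))),
      (∀ k, k ≠ "" → PySem.Set.contains emitted k = false →
        all.filter (fun r => pvPid r == k) = rest.filter (fun r => pvPid r == k)) →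
      (rest.foldl (pvStepA by_id) (out, emitted)).1
        = out ++ pvEmit (fun k => PySem.Set.contains emitted k) rest := by
  intro rest
  induction rest with
  | nil => intro emitted out _; simp [pvEmit]
  | cons p t ih =>
    intro emitted out hrest
    rw [List.foldl_cons]
    by_cases hp : pvPid p = ""
    · have hstep : pvStepA by_id (out, emitted) p = (out ++ [p], emitted) := by
        simp only [pvStepA]; rw [if_pos hp]
      have hemit : pvEmit (fun k => PySem.Set.contains emitted k) (p :: t)
          = p :: pvEmit (fun k => PySem.Set.contains emitted k) t := by
        simp only [pvEmit]; rw [if_pos hp]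
      rw [hstep, ih emitted (out ++ [p]) ?_, hemit]
      · simp
      · intro k hk hc
        rw [hrest k hk hc, List.filter_cons]
        have h2 : (pvPid p == k) = false := by
          rw [hp]; exact beq_eq_false_iff_ne.mpr (Ne.symm hk)
        simp [h2]
    · by_cases hc : PySem.Set.contains emitted (pvPid p) = true
      · have hstep : pvStepA by_id (out, emitted) p = (out, emitted) := by
          simp only [pvStepA]; rw [if_neg hp, if_pos hc]
        have hemit : pvEmit (fun k => PySem.Set.contains emitted k) (p :: t)
            = pvEmit (fun k => PySem.Set.contains emitted k) t := by
          simp only [pvEmit]; rw [if_neg hp, if_pos hc]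
        rw [hstep, ih emitted out ?_, hemit]
        · intro k hk hck
          rw [hrest k hk hck, List.filter_cons]
          have h2 : (pvPid p == k) = false := by
            cases hb : (pvPid p == k) with
            | false => rfl
            | true =>
              have hkk := beq_iff_eq.mp hb
              rw [hkk] at hc
              rw [hc] at hck
              exact absurd hck (by simp)
          simp [h2]
      · -- first occurrence of this pid
        have hcf : PySem.Set.contains emitted (pvPid p) = false := by
          cases h : PySem.Set.contains emitted (pvPid p)
          · rfl
          · exact absurd h hc
        have hall := hrest (pvPid p) hp hcf
        have hfc : (p :: t).filter (fun r => pvPid r == pvPid p)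
            = p :: t.filter (fun r => pvPid r == pvPid p) := by
          simp
        have hgd : PySem.Dict.getD by_id (pvPid p) []
            = p :: t.filter (fun r => pvPid r == pvPid p) := by
          rw [hby _ hp, hall, hfc]
        have hget : PySem.Dict.get? by_id (pvPid p)
            = some (p :: t.filter (fun r => pvPid r == pvPid p)) := by
          unfold PySem.Dict.getD at hgd
          cases h : PySem.Dict.get? by_id (pvPid p) with
          | none => rw [h] at hgd; simp at hgd
          | some v => rw [h] at hgd; simp at hgd; rw [hgd]
        have hgroup : PySem.Dict.getD by_id (pvPid p) [p]
            = p :: t.filter (fun r => pvPid r == pvPid p) := by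
          simp [PySem.Dict.getD, hget]
        have hst : (PySem.Dict.getD by_id (pvPid p) [p]).filter pvNamed
            = (p :: t).filter (fun x => pvNamed x && (pvPid x == pvPid p)) := by
          rw [hgroup, ← hfc, List.filter_filter]
        have hseen : (fun k => PySem.Set.contains (PySem.Set.add emitted (pvPid p)) k)
            = (fun k => k == pvPid p || PySem.Set.contains emitted k) := by
          funext k; exact pvSet_contains_add emitted (pvPid p) k
        have hrest' : ∀ k, k ≠ "" →
            PySem.Set.contains (PySem.Set.add emitted (pvPid p)) k = false →
            all.filter (fun r => pvPid r == k) = t.filter (fun r => pvPid r == k) := by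
          intro k hk hck
          rw [pvSet_contains_add] at hck
          have h1 : (k == pvPid p) = false := by
            cases h : (k == pvPid p)
            · rfl
            · rw [h] at hck; simp at hck
          have h2 : PySem.Set.contains emitted k = false := by
            cases h : PySem.Set.contains emitted k
            · rfl
            · rw [h] at hck; simp at hck
          rw [hrest k hk h2, List.filter_cons]
          have h3 : (pvPid p == k) = false := by
            cases h : (pvPid p == k)
            · rfl
            · have hkk := beq_iff_eq.mp h
              rw [hkk] at h1
              simp at h1
          simp [h3]
        have hemit : pvEmit (fun k => PySem.Set.contains emitted k) (p :: t)
            = pvUpd (p :: t) p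
              :: pvEmit (fun k => k == pvPid p || PySem.Set.contains emitted k) t := by
          simp only [pvEmit]
          rw [if_neg hp, if_neg (by rw [hcf]; exact Bool.false_ne_true)]
        by_cases hempty :
            (p :: t).filter (fun x => pvNamed x && (pvPid x == pvPid p)) = []
        · have hstep : pvStepA by_id (out, emitted) p
              = (out ++ [p], PySem.Set.add emitted (pvPid p)) := by
            simp only [pvStepA]
            rw [if_neg hp, if_neg (by rw [hcf]; exact Bool.false_ne_true), hst,
              if_pos hempty, hgroup]
            rfl
          rw [hstep, ih _ _ hrest', hemit]
          have hupd : pvUpd (p :: t) p = p := by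
            unfold pvUpd; rw [if_neg hp, hempty]; rfl
          rw [hupd, hseen]
          simp
        · have hstep : pvStepA by_id (out, emitted) p
              = (out ++ [((p :: t).filter
                    (fun x => pvNamed x && (pvPid x == pvPid p))).getLastD []],
                  PySem.Set.add emitted (pvPid p)) := by
            simp only [pvStepA]
            rw [if_neg hp, if_neg (by rw [hcf]; exact Bool.false_ne_true), hst,
              if_neg hempty]
          rw [hstep, ih _ _ hrest', hemit]
          have hupd : pvUpd (p :: t) p
              = ((p :: t).filter (fun x => pvNamed x && (pvPid x == pvPid p))).getLastD [] := by
            unfold pvUpd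
            rw [if_neg hp]
            cases h : (p :: t).filter (fun x => pvNamed x && (pvPid x == pvPid p)) with
            | nil => exact absurd h hempty
            | cons a l => rw [List.getLastD_cons, List.getLastD_cons]
          rw [hupd, hseen]
          simp

lemma pvLt_of_getElem? {α : Type} {l : List α} {j : Nat} {r : α}
    (h : l[j]? = some r) : j < l.length := by
  by_contra hge
  rw [List.getElem?_eq_none (by omega)] at h
  simp at h

lemma pvMapNeutral (p : List (String × String)) (t out : List (List (String × String)))
    (h : ∀ r ∈ out, pvNamed p = false ∨ pvPid p ≠ pvPid r ∨ pvPid r = "") :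
    out.map (pvUpd t) = out.map (pvUpd (p :: t)) := by
  apply List.map_congr_left
  intro r hr
  exact (pvUpd_cons_of_ne p t r (h r hr)).symm

lemma pvMapSetNamed (p r0 : List (String × String)) (t out : List (List (String × String)))
    (j : Nat) (hjlt : j < out.length) (hr0 : out[j]? = some r0)
    (hpid0 : pvPid r0 = pvPid p) (hp : pvPid p ≠ "") (hn : pvNamed p = true)
    (hother : ∀ i r, out[i]? = some r → pvPid r ≠ "" → pvPid r = pvPid p → i = j) :
    (out.set j p).map (pvUpd t) = out.map (pvUpd (p :: t)) := by
  rw [List.map_set]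
  apply List.ext_getElem?
  intro i
  by_cases hij : i = j
  · subst hij
    rw [List.getElem?_set_self (by simpa using hjlt), List.getElem?_map, hr0]
    simp only [Option.map_some]
    rw [pvUpd_cons_named p t r0 hpid0 hp hn]
  · rw [List.getElem?_set_ne (fun h => hij h.symm), List.getElem?_map, List.getElem?_map]
    cases hri : out[i]? with
    | none => simp
    | some r =>
      simp only [Option.map_some, Option.some.injEq]
      refine (pvUpd_cons_of_ne p t r ?_).symm
      by_cases hr0' : pvPid r = ""
      · exact Or.inr (Or.inr hr0')
      · exact Or.inr (Or.inl fun hpr => hij (hother i r hri hr0' hpr.symm))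

set_option maxHeartbeats 1000000 in
lemma pvB_loop :
    ∀ (rest out : List (List (String × String))) (slot : PySem.Dict String Nat),
      (∀ k j, PySem.Dict.get? slot k = some j →
        k ≠ "" ∧ ∃ r, out[j]? = some r ∧ pvPid r = k) →
      (∀ j r, out[j]? = some r → pvPid r ≠ "" →
        PySem.Dict.get? slot (pvPid r) = some j) →
      (rest.foldl pvStepB (out, slot)).1
        = out.map (pvUpd rest)
          ++ pvEmit (fun k => (PySem.Dict.get? slot k).isSome) rest := by
  intro rest
  induction rest with
  | nil =>
    intro out slot _ _
    have hm : out.map (pvUpd []) = out := by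
      rw [List.map_congr_left (fun r _ => by unfold pvUpd; split <;> rfl), List.map_id']
    simp only [List.foldl_nil, pvEmit, List.append_nil]
    exact hm.symm
  | cons p t ih =>
    intro out slot h1 h2
    rw [List.foldl_cons]
    by_cases hp : pvPid p = ""
    · have hstep : pvStepB (out, slot) p = (out ++ [p], slot) := by
        simp only [pvStepB]; rw [if_pos hp]
      have hI1 : ∀ k j, PySem.Dict.get? slot k = some j →
          k ≠ "" ∧ ∃ r, (out ++ [p])[j]? = some r ∧ pvPid r = k := by
        intro k j hj
        obtain ⟨hk, r, hr, hrp⟩ := h1 k j hj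
        refine ⟨hk, r, ?_, hrp⟩
        rw [List.getElem?_append_left (pvLt_of_getElem? hr)]
        exact hr
      have hI2 : ∀ j r, (out ++ [p])[j]? = some r → pvPid r ≠ "" →
          PySem.Dict.get? slot (pvPid r) = some j := by
        intro j r hr hrp
        by_cases hlt : j < out.length
        · rw [List.getElem?_append_left hlt] at hr
          exact h2 j r hr hrp
        · have hlen := pvLt_of_getElem? hr
          simp only [List.length_append, List.length_cons, List.length_nil] at hlen
          have hj : j = out.length := by omega
          subst hj
          rw [List.getElem?_concat_length] at hr
          cases hr
          exact absurd hp hrp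
      have hmap : out.map (pvUpd t) = out.map (pvUpd (p :: t)) := by
        apply List.map_congr_left
        intro r _
        refine (pvUpd_cons_of_ne p t r ?_).symm
        by_cases hr0 : pvPid r = ""
        · exact Or.inr (Or.inr hr0)
        · exact Or.inr (Or.inl (by rw [hp]; exact Ne.symm hr0))
      have hlast : pvUpd t p = p := by unfold pvUpd; rw [if_pos hp]
      have hemit : pvEmit (fun k => (PySem.Dict.get? slot k).isSome) (p :: t)
          = p :: pvEmit (fun k => (PySem.Dict.get? slot k).isSome) t := by
        simp only [pvEmit]
        exact if_pos hp
      rw [hstep, ih (out ++ [p]) slot hI1 hI2, hemit, List.map_append, hmap]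
      simp [hlast]
    · by_cases hc : PySem.Dict.contains slot (pvPid p) = true
      · have hsome : (PySem.Dict.get? slot (pvPid p)).isSome = true := by
          rw [← pvDict_contains_eq]; exact hc
        obtain ⟨j, hj⟩ := Option.isSome_iff_exists.mp hsome
        obtain ⟨-, r0, hr0, hpid0⟩ := h1 _ _ hj
        have hjlt : j < out.length := pvLt_of_getElem? hr0
        have hemit : pvEmit (fun k => (PySem.Dict.get? slot k).isSome) (p :: t)
            = pvEmit (fun k => (PySem.Dict.get? slot k).isSome) t := by
          simp only [pvEmit]
          rw [if_neg hp]
          exact if_pos hsome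
        cases hn : pvNamed p with
        | false =>
          have hstep : pvStepB (out, slot) p = (out, slot) := by
            have hnn : ¬ (pvNamed p = true) := by rw [hn]; exact Bool.false_ne_true
            simp only [pvStepB]
            rw [if_neg hp, if_neg hnn, if_pos hc]
          have hmap := pvMapNeutral p t out (fun r _ => Or.inl hn)
          rw [hstep, ih out slot h1 h2, hmap]
          exact congrArg (fun l => List.map (pvUpd (p :: t)) out ++ l) hemit.symm
        | true =>
          have hidx : PySem.Dict.getD slot (pvPid p) 0 = j := by
            unfold PySem.Dict.getD; rw [hj]; rfl
          have hstep : pvStepB (out, slot) p = (out.set j p, slot) := by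
            simp only [pvStepB]
            rw [if_neg hp, if_pos hc, if_pos hn]
            show (out.set (PySem.Dict.getD slot (pvPid p) 0) p, slot) = _
            rw [hidx]
          have hI1 : ∀ k' j', PySem.Dict.get? slot k' = some j' →
              k' ≠ "" ∧ ∃ r', (out.set j p)[j']? = some r' ∧ pvPid r' = k' := by
            intro k' j' hj'
            obtain ⟨hk', r', hr', hrp'⟩ := h1 k' j' hj'
            by_cases hj'j : j' = j
            · subst hj'j
              refine ⟨hk', p, List.getElem?_set_self hjlt, ?_⟩
              have hr0r' : r' = r0 := by
                rw [hr0] at hr'; exact (Option.some.inj hr').symm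
              rw [hr0r'] at hrp'
              rw [← hrp', hpid0]
            · refine ⟨hk', r', ?_, hrp'⟩
              rw [List.getElem?_set_ne (fun h => hj'j h.symm)]
              exact hr'
          have hI2 : ∀ j' r', (out.set j p)[j']? = some r' → pvPid r' ≠ "" →
              PySem.Dict.get? slot (pvPid r') = some j' := by
            intro j' r' hr' hrp'
            by_cases hj'j : j' = j
            · subst hj'j
              rw [List.getElem?_set_self hjlt] at hr'
              cases hr'
              rw [hj]
            · rw [List.getElem?_set_ne (fun h => hj'j h.symm)] at hr'
              exact h2 j' r' hr' hrp'
          have hmap : (out.set j p).map (pvUpd t) = out.map (pvUpd (p :: t)) := by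
            apply pvMapSetNamed p r0 t out j hjlt hr0 hpid0 hp hn
            intro i r hri hrne hreq
            have h3 := h2 i r hri hrne
            rw [hreq, hj] at h3
            exact (Option.some.inj h3).symm
          rw [hstep, ih (out.set j p) slot hI1 hI2, hmap]
          exact congrArg (fun l => List.map (pvUpd (p :: t)) out ++ l) hemit.symm
      · -- new pid: slot gains a binding at index out.length
        have hcf : PySem.Dict.contains slot (pvPid p) = false := by
          cases h : PySem.Dict.contains slot (pvPid p)
          · rfl
          · exact absurd h hc
        have hnone : PySem.Dict.get? slot (pvPid p) = none := by
          rw [pvDict_contains_eq] at hcf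
          exact Option.not_isSome_iff_eq_none.mp (by rw [hcf]; simp)
        have hcc : ¬ (PySem.Dict.contains slot (pvPid p) = true) := by
          rw [hcf]; exact Bool.false_ne_true
        have hstep : pvStepB (out, slot) p
            = (out ++ [p], PySem.Dict.insert slot (pvPid p) out.length) := by
          cases hn : pvNamed p with
          | false =>
            have hnn : ¬ (pvNamed p = true) := by rw [hn]; exact Bool.false_ne_true
            simp only [pvStepB]
            rw [if_neg hp, if_neg hnn, if_neg hcc]
          | true =>
            simp only [pvStepB]
            rw [if_neg hp, if_pos hn, if_neg hcc]
            show ((out ++ [p]).set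
              (PySem.Dict.getD (PySem.Dict.insert slot (pvPid p) out.length)
                (pvPid p) 0) p, PySem.Dict.insert slot (pvPid p) out.length) = _
            have hidx : PySem.Dict.getD (PySem.Dict.insert slot (pvPid p) out.length)
                (pvPid p) 0 = out.length := by
              unfold PySem.Dict.getD
              rw [PySem.Dict.get?_insert_self]
              rfl
            rw [hidx, pvSetLast]
        have hI1 : ∀ k' j',
            PySem.Dict.get? (PySem.Dict.insert slot (pvPid p) out.length) k' = some j' →
            k' ≠ "" ∧ ∃ r, (out ++ [p])[j']? = some r ∧ pvPid r = k' := by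
          intro k' j' hj'
          by_cases hk' : k' = pvPid p
          · subst hk'
            rw [PySem.Dict.get?_insert_self] at hj'
            cases hj'
            exact ⟨hp, p, List.getElem?_concat_length, rfl⟩
          · rw [PySem.Dict.get?_insert_of_ne slot _ hk'] at hj'
            obtain ⟨hk, r, hr, hrp⟩ := h1 _ _ hj'
            refine ⟨hk, r, ?_, hrp⟩
            rw [List.getElem?_append_left (pvLt_of_getElem? hr)]
            exact hr
        have hI2 : ∀ j' r, (out ++ [p])[j']? = some r → pvPid r ≠ "" →
            PySem.Dict.get? (PySem.Dict.insert slot (pvPid p) out.length) (pvPid r)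
              = some j' := by
          intro j' r hr hrp
          by_cases hlt : j' < out.length
          · rw [List.getElem?_append_left hlt] at hr
            have h3 := h2 j' r hr hrp
            have hne : pvPid r ≠ pvPid p := by
              intro he; rw [he, hnone] at h3; simp at h3
            rw [PySem.Dict.get?_insert_of_ne slot _ hne]
            exact h3
          · have hlen := pvLt_of_getElem? hr
            simp only [List.length_append, List.length_cons, List.length_nil] at hlen
            have hj' : j' = out.length := by omega
            subst hj'
            rw [List.getElem?_concat_length] at hr
            cases hr
            rw [PySem.Dict.get?_insert_self]
        have hseen : (fun k =>
            (PySem.Dict.get? (PySem.Dict.insert slot (pvPid p) out.length) k).isSome)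
            = (fun k => k == pvPid p || (PySem.Dict.get? slot k).isSome) := by
          funext k
          by_cases hk : k = pvPid p
          · subst hk; rw [PySem.Dict.get?_insert_self]; simp
          · rw [PySem.Dict.get?_insert_of_ne slot _ hk]
            have hb : (k == pvPid p) = false := by simp [hk]
            rw [hb, Bool.false_or]
        have hmap : out.map (pvUpd t) = out.map (pvUpd (p :: t)) := by
          apply List.map_congr_left
          intro r hr
          refine (pvUpd_cons_of_ne p t r ?_).symm
          by_cases hr0' : pvPid r = ""
          · exact Or.inr (Or.inr hr0')
          · refine Or.inr (Or.inl fun hpr => ?_)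
            obtain ⟨i, hi⟩ := List.getElem?_of_mem hr
            have h3 := h2 i r hi hr0'
            rw [← hpr, hnone] at h3
            simp at h3
        have hupd : pvUpd t p = pvUpd (p :: t) p := (pvUpd_cons_self p t hp).symm
        have hfalse : (PySem.Dict.get? slot (pvPid p)).isSome = false := by
          rw [hnone]; rfl
        have hemit : pvEmit (fun k => (PySem.Dict.get? slot k).isSome) (p :: t)
            = pvUpd (p :: t) p
              :: pvEmit (fun k => k == pvPid p
                  || (PySem.Dict.get? slot k).isSome) t := by
          simp only [pvEmit]
          rw [if_neg hp]
          exact if_neg (by rw [hfalse]; exact Bool.false_ne_true)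
        rw [hstep, ih (out ++ [p]) (PySem.Dict.insert slot (pvPid p) out.length) hI1 hI2,
          hseen, hemit, List.map_append, hmap]
        simp [hupd]

-- ===== VERDICT (by name: the statement is the Claim_ definition above) =====
theorem dedupe_players_current_stint_spec : Claim_equal_dedupe_players_current_stint := by
  intro players _
  unfold Spec_dedupe_players_current_stint
  have hby : ∀ k, k ≠ "" → PySem.Dict.getD (pvById players) k []
      = players.filter (fun r => pvPid r == k) := by
    intro k hk
    unfold pvById
    rw [pvBuild_getD players PySem.Dict.empty k hk]
    simp [PySem.Dict.getD, PySem.Dict.empty, PySem.Dict.get?]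
  have hA : dedupe_players_current_stint players = pvEmit (fun _ => false) players := by
    unfold dedupe_players_current_stint
    rw [pvA_loop players (pvById players) hby players PySem.Set.empty []
      (fun _ _ _ => rfl)]
    have hz : (fun k => PySem.Set.contains PySem.Set.empty k) = (fun _ : String => false) := by
      funext k; rfl
    rw [hz]
    simp
  have hB : dedupe_players_current_stint_alt players = pvEmit (fun _ => false) players := by
    unfold dedupe_players_current_stint_alt
    rw [pvB_loop players [] PySem.Dict.empty ?_ ?_]
    · have hz : (fun k =>
          (PySem.Dict.get? (PySem.Dict.empty (κ := String) (ν := Nat)) k).isSome)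
          = (fun _ : String => false) := by
        funext k; rfl
      rw [hz]
      simp
    · intro k j hj
      exact absurd hj (by simp [PySem.Dict.empty, PySem.Dict.get?])
    · intro j r hr
      exact absurd hr (by simp)
  rw [hA, hB]
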